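-- pv_equiv track=rewrite | github.com/voidnologo/cypher | word_patterns.py | create_word_pattern
-- ===== SOURCE A (Python) =====
-- def create_word_pattern(word):
--     next_num = 0
--     letter_ids = {}
--     word_pattern = []
--     for letter in word.upper():
--         if letter not in letter_ids:
--             letter_ids[letter] = str(next_num)
--             next_num += 1
--         word_pattern.append(letter_ids[letter])
--     return '.'.join(word_pattern)
-- ===== SOURCE B (Python) =====
-- def create_word_pattern(word):
--     u = word.upper()
--     first = {c: u.index(c) for c in set(u)}
--     order = sorted(first.values())
--     return '.'.join(str(order.index(first[c])) for c in u)
-- ===== Notes on version B (the rewrite author's own statement) =====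
-- stated objective: alternative
-- what changed: B replaces A's incremental id counter with a sort-and-rank scheme: it computes each distinct letter's first-occurrence position, sorts those positions, and emits each letter's id as the rank (list index) of its first occurrence in that sorted list.
import Mathlib
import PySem

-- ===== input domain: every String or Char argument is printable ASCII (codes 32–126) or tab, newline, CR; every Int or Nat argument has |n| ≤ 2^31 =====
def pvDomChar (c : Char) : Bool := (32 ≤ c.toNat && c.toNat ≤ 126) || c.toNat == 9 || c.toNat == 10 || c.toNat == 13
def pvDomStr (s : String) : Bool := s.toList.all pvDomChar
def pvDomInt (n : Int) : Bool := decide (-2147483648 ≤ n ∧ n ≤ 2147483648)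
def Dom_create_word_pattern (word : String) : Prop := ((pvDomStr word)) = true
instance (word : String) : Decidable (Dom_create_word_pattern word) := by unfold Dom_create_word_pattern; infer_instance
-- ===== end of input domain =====

-- B assigns ids by SORTING the first-occurrence positions of the distinct letters and
-- ranking each letter's first occurrence in that sorted list, instead of A's single
-- loop with an incremental id counter (alternative decomposition, same result).

-- ===== PORT A =====
def create_word_pattern (word : String) : String :=
  let res := (PySem.Str.upper word).toList.foldl
    (fun (st : Int × PySem.Dict Char String × List String) letter =>
      let st :=
        if st.2.1.contains letter = false then
          (st.1 + 1, st.2.1.insert letter (PySem.Int.toStr st.1), st.2.2)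
        else st
      (st.1, st.2.1, st.2.2 ++ [st.2.1.getD letter ""]))
    (0, PySem.Dict.empty, [])
  PySem.Str.join "." res.2.2

-- ===== PORT B =====
-- set(u) is iterated in PySem.Set order; B's result depends on `first` only through
-- keyed lookup and sorting its values without a key, so any iteration order is exact.
-- u.index(c) and order.index(...) never raise here (the element is always present);
-- the .getD 0 only totalizes the unreachable ValueError case.
def create_word_pattern_alt (word : String) : String :=
  let u := (PySem.Str.upper word).toList
  let first : PySem.Dict Char Int :=
    (PySem.Set.ofList u).foldl
      (fun d c => d.insert c (((PySem.List.index? u c).getD 0 : Nat) : Int))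
      PySem.Dict.empty
  let order := PySem.List.sorted first.values (fun x => x) false
  PySem.Str.join "." (u.map (fun c =>
    PySem.Int.toStr (((PySem.List.index? order (first.getD c 0)).getD 0 : Nat) : Int)))

-- ===== PRECONDITION & SPEC =====
def Spec_create_word_pattern (word : String) (out : String) : Prop := out = create_word_pattern_alt word
instance (word : String) (out : String) : Decidable (Spec_create_word_pattern word out) := by unfold Spec_create_word_pattern; infer_instance

-- ===== CLAIM (what is proved, stated in full; the proofs are below) =====
def Claim_equal_create_word_pattern : Prop := ∀ (word : String), Dom_create_word_pattern word → Spec_create_word_pattern word (create_word_pattern word)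

-- ===== LEMMAS AND PROOFS =====

-- A's dict (String values) in closed form
def mkDictS (u : List Char) : PySem.Dict Char String :=
  (PySem.List.enumerate u).foldl
    (fun d p => d.insert p.2 (PySem.Int.toStr p.1)) PySem.Dict.empty

theorem fold_enum_getD {ν : Type} (g : Int → ν) (u : List Char) (d0 : ν)
    (hu : u.Nodup) (c : Char) (hc : c ∈ u) :
    ((PySem.List.enumerate u).foldl
      (fun (d : PySem.Dict Char ν) p => d.insert p.2 (g p.1)) PySem.Dict.empty).getD c d0
      = g (u.idxOf c : Int) := by
  induction u using List.reverseRecOn with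
  | nil => simp at hc
  | append_singleton u a ih =>
    rw [PySem.List.enumerate_append, List.foldl_append]
    simp only [PySem.List.enumerate_cons, PySem.List.enumerate_nil, List.foldl_cons,
      List.foldl_nil]
    have hnd := hu
    rw [List.nodup_append] at hnd
    obtain ⟨hu', hna, hdisj⟩ := hnd
    by_cases hca : c = a
    · subst hca
      have hnotmem : c ∉ u := by
        intro h
        exact hdisj _ h _ (List.mem_singleton.mpr rfl) rfl
      rw [PySem.Dict.getD_insert_self, List.idxOf_append_of_notMem hnotmem]
      simp
    · have hcu : c ∈ u := by
        rcases List.mem_append.mp hc with h | h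
        · exact h
        · simp at h; exact absurd h hca
      rw [PySem.Dict.getD_insert_of_ne, ih hu' hcu, List.idxOf_append_of_mem hcu]
      exact fun h => hca (by simpa using h)

theorem getD_mkDictS (u : List Char) (hu : u.Nodup) (c : Char) (hc : c ∈ u) :
    (mkDictS u).getD c "" = PySem.Int.toStr (u.idxOf c : Int) :=
  fold_enum_getD PySem.Int.toStr u "" hu c hc

theorem contains_mkDictS (u : List Char) (c : Char) :
    (mkDictS u).contains c = decide (c ∈ u) := by
  rw [mkDictS, PySem.Dict.contains_eq_decide_mem_keys,
    PySem.Dict.keys_foldl_insert_key (PySem.List.enumerate u) (·.2)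
      (fun _ p => PySem.Int.toStr p.1) PySem.Dict.empty]
  simp [PySem.Set.update_nil_left, PySem.List.map_snd_enumerate, PySem.Set.mem_ofList]

theorem mkDictS_append (u : List Char) (a : Char) :
    mkDictS (u ++ [a]) = (mkDictS u).insert a (PySem.Int.toStr (u.length : Int)) := by
  rw [mkDictS, mkDictS, PySem.List.enumerate_append, List.foldl_append]
  simp [PySem.List.enumerate_cons, PySem.List.enumerate_nil]

-- A's fold state in closed form: the running id dict is the table over the distinct
-- letters seen so far, and the emitted pattern is the per-letter index map
theorem A_fold (p : List Char) :
    p.foldl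
      (fun (st : Int × PySem.Dict Char String × List String) letter =>
        let st :=
          if st.2.1.contains letter = false then
            (st.1 + 1, st.2.1.insert letter (PySem.Int.toStr st.1), st.2.2)
          else st
        (st.1, st.2.1, st.2.2 ++ [st.2.1.getD letter ""]))
      (0, PySem.Dict.empty, [])
    = (((PySem.Set.ofList p).length : Int), mkDictS (PySem.Set.ofList p),
       p.map (fun c => PySem.Int.toStr (((PySem.Set.ofList p).idxOf c : Nat) : Int))) := by
  induction p using List.reverseRecOn with
  | nil => simp [PySem.Set.ofList_nil, mkDictS, PySem.List.enumerate_nil]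
  | append_singleton p a ih =>
    rw [List.foldl_append, ih]
    simp only [List.foldl_cons, List.foldl_nil]
    by_cases ha : a ∈ p
    · have hmem : a ∈ PySem.Set.ofList p := (PySem.Set.mem_ofList _ _).mpr ha
      have hof : PySem.Set.ofList (p ++ [a]) = PySem.Set.ofList p := by
        rw [PySem.Set.ofList_append_singleton, PySem.Set.add_of_mem hmem]
      rw [hof]
      simp only [contains_mkDictS, hmem, decide_true]
      rw [if_neg (by simp)]
      simp only [List.map_append, List.map_cons, List.map_nil]
      rw [getD_mkDictS _ (PySem.Set.nodup_ofList _) a hmem]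
    · have hnmem : a ∉ PySem.Set.ofList p := fun h => ha ((PySem.Set.mem_ofList _ _).mp h)
      have hof : PySem.Set.ofList (p ++ [a]) = PySem.Set.ofList p ++ [a] := by
        rw [PySem.Set.ofList_append_singleton, PySem.Set.add_of_not_mem hnmem]
      rw [hof]
      simp only [contains_mkDictS, hnmem, decide_false]
      rw [if_pos trivial]
      refine Prod.ext ?_ (Prod.ext ?_ ?_) <;> simp only
      · simp
      · rw [mkDictS_append]
      · rw [List.map_append]
        congr 1
        · apply List.map_congr_left
          intro c hc
          rw [List.idxOf_append_of_mem ((PySem.Set.mem_ofList _ _).mpr hc)]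
        · simp only [List.map_cons, List.map_nil]
          rw [PySem.Dict.getD_insert_self, List.idxOf_append_of_notMem hnmem]
          simp

-- B-side: the dict built over a Nodup key list maps each key to g of it
theorem foldl_insert_getD {ν : Type} (g : Char → ν) (D : List Char) (d0 : ν)
    (hD : D.Nodup) (c : Char) (hc : c ∈ D) :
    (D.foldl (fun (d : PySem.Dict Char ν) k => d.insert k (g k)) PySem.Dict.empty).getD c d0
      = g c := by
  induction D using List.reverseRecOn with
  | nil => simp at hc
  | append_singleton D a ih =>
    rw [List.foldl_append]
    simp only [List.foldl_cons, List.foldl_nil]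
    have hnd := hD
    rw [List.nodup_append] at hnd
    obtain ⟨hD', -, hdisj⟩ := hnd
    by_cases hca : c = a
    · subst hca; rw [PySem.Dict.getD_insert_self]
    · have hcu : c ∈ D := by
        rcases List.mem_append.mp hc with h | h
        · exact h
        · simp at h; exact absurd h hca
      rw [PySem.Dict.getD_insert_of_ne, ih hD' hcu]
      exact fun h => hca (by simpa using h)

-- B-side: its values list is the map of g over the keys in order
theorem foldl_insert_values {ν : Type} (g : Char → ν) (D : List Char) (hD : D.Nodup) :
    (D.foldl (fun (d : PySem.Dict Char ν) k => d.insert k (g k)) PySem.Dict.empty).values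
      = D.map g := by
  cases D with
  | nil => simp [PySem.Dict.empty]
  | cons d0 D' =>
    have hkeys : ((d0 :: D').foldl (fun (d : PySem.Dict Char ν) k => d.insert k (g k))
        PySem.Dict.empty).keys = d0 :: D' := by
      rw [PySem.Dict.keys_foldl_insert (d0 :: D') (fun _ k => g k) PySem.Dict.empty]
      have : (PySem.Dict.empty : PySem.Dict Char ν).keys = [] := rfl
      rw [this, PySem.Set.update_nil_left]
      exact PySem.Set.ofList_eq_self_of_nodup _ hD
    rw [PySem.Dict.values_eq_map_keys _ (by rw [hkeys]; exact hD) (g d0), hkeys]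
    exact List.map_congr_left (fun k hk => foldl_insert_getD g (d0 :: D') (g d0) hD k hk)

-- index? of a member computes idxOf
theorem index?_getD_of_mem {α : Type} [DecidableEq α] (u : List α) (c : α) (hc : c ∈ u) :
    (PySem.List.index? u c).getD 0 = u.idxOf c := by
  induction u with
  | nil => simp at hc
  | cons x xs ih =>
    by_cases hxc : x = c
    · subst hxc
      rw [PySem.List.index?_cons_self]
      simp [List.idxOf_cons_self]
    · rw [PySem.List.index?_cons_of_ne _ hxc]
      have hcu : c ∈ xs := by
        rcases List.mem_cons.mp hc with h | h
        · exact absurd h.symm hxc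
        · exact h
      have hs : (PySem.List.index? xs c).isSome := (PySem.List.index?_isSome_iff _ _).mpr hcu
      obtain ⟨k, hk⟩ := Option.isSome_iff_exists.mp hs
      rw [hk]
      have := ih hcu
      rw [hk] at this
      simp only [Option.map_some, Option.getD_some] at this ⊢
      rw [List.idxOf_cons_ne _ hxc, this]

-- first-occurrence indices are strictly increasing along PySem.Set.ofList
theorem ofList_idxOf_pairwise (u : List Char) :
    (PySem.Set.ofList u).Pairwise (fun a b => u.idxOf a < u.idxOf b) := by
  induction u using List.reverseRecOn with
  | nil => simp [PySem.Set.ofList_nil]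
  | append_singleton p a ih =>
    by_cases ha : a ∈ p
    · have hmem : a ∈ PySem.Set.ofList p := (PySem.Set.mem_ofList _ _).mpr ha
      rw [PySem.Set.ofList_append_singleton, PySem.Set.add_of_mem hmem]
      refine List.Pairwise.imp_of_mem ?_ ih
      intro x y hx hy hxy
      have hxp : x ∈ p := (PySem.Set.mem_ofList _ _).mp hx
      have hyp : y ∈ p := (PySem.Set.mem_ofList _ _).mp hy
      rwa [List.idxOf_append_of_mem hxp, List.idxOf_append_of_mem hyp]
    · have hnmem : a ∉ PySem.Set.ofList p := fun h => ha ((PySem.Set.mem_ofList _ _).mp h)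
      rw [PySem.Set.ofList_append_singleton, PySem.Set.add_of_not_mem hnmem]
      rw [List.pairwise_append]
      refine ⟨?_, by simp, ?_⟩
      · refine List.Pairwise.imp_of_mem ?_ ih
        intro x y hx hy hxy
        have hxp : x ∈ p := (PySem.Set.mem_ofList _ _).mp hx
        have hyp : y ∈ p := (PySem.Set.mem_ofList _ _).mp hy
        rwa [List.idxOf_append_of_mem hxp, List.idxOf_append_of_mem hyp]
      · intro x hx y hy
        have hxp : x ∈ p := (PySem.Set.mem_ofList _ _).mp hx
        simp only [List.mem_singleton] at hy
        subst hy
        rw [List.idxOf_append_of_mem hxp, List.idxOf_append_of_notMem ha]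
        have := List.idxOf_lt_length_of_mem hxp
        simp
        omega

-- rank inside a strictly increasing mapped list is the original index
theorem idxOf_map_of_pairwise {κ : Type} [LinearOrder κ] [DecidableEq κ] (f : Char → κ)
    (D : List Char) (hp : (D.map f).Pairwise (· < ·)) (c : Char) (hc : c ∈ D) :
    (D.map f).idxOf (f c) = D.idxOf c := by
  induction D with
  | nil => simp at hc
  | cons d t ih =>
    by_cases hcd : c = d
    · subst hcd; simp [List.idxOf_cons_self]
    · have hct : c ∈ t := by
        rcases List.mem_cons.mp hc with h | h
        · exact absurd h hcd
        · exact h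
      have hp' := List.pairwise_cons.mp (by simpa using hp :
        List.Pairwise (· < ·) (f d :: t.map f))
      have hlt : f d < f c := hp'.1 (f c) (List.mem_map_of_mem hct)
      rw [List.map_cons, List.idxOf_cons_ne _ hlt.ne,
        List.idxOf_cons_ne _ (fun h => hcd h.symm),
        ih hp'.2 hct]

-- ===== VERDICT (by name: the statement is the Claim_ definition above) =====
theorem create_word_pattern_spec : Claim_equal_create_word_pattern := by
  intro word _
  unfold Spec_create_word_pattern
  simp only [create_word_pattern, create_word_pattern_alt]
  rw [A_fold]
  refine congrArg (PySem.Str.join ".") ?_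
  generalize (PySem.Str.upper word).toList = u
  have hD : (PySem.Set.ofList u).Nodup := PySem.Set.nodup_ofList _
  have hg : ∀ k ∈ PySem.Set.ofList u,
      (((PySem.List.index? u k).getD 0 : Nat) : Int) = ((u.idxOf k : Nat) : Int) := by
    intro k hk
    rw [index?_getD_of_mem u k ((PySem.Set.mem_ofList _ _).mp hk)]
  have hvals : ((PySem.Set.ofList u).foldl
      (fun (d : PySem.Dict Char Int) c =>
        d.insert c (((PySem.List.index? u c).getD 0 : Nat) : Int)) PySem.Dict.empty).values
      = (PySem.Set.ofList u).map (fun k => ((u.idxOf k : Nat) : Int)) := by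
    rw [foldl_insert_values _ _ hD]
    exact List.map_congr_left hg
  have hpw : ((PySem.Set.ofList u).map (fun k => ((u.idxOf k : Nat) : Int))).Pairwise
      (· < ·) := by
    rw [List.pairwise_map]
    refine (ofList_idxOf_pairwise u).imp ?_
    intro a b h
    exact_mod_cast h
  have horder : PySem.List.sorted ((PySem.Set.ofList u).map
        (fun k => ((u.idxOf k : Nat) : Int))) (fun x => x) false
      = (PySem.Set.ofList u).map (fun k => ((u.idxOf k : Nat) : Int)) :=
    PySem.List.sorted_eq_of_perm_of_pairwise_lt _ _ (fun x => x) (List.Perm.refl _) hpw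
  rw [hvals, horder]
  apply List.map_congr_left
  intro c hc
  have hcD : c ∈ PySem.Set.ofList u := (PySem.Set.mem_ofList _ _).mpr hc
  rw [foldl_insert_getD _ _ _ hD c hcD, hg c hcD,
    index?_getD_of_mem _ _ (List.mem_map_of_mem hcD),
    idxOf_map_of_pairwise _ _ hpw c hcD]
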